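-- pv_equiv track=rewrite | github.com/Gnccw/condition_linear_attack_code | skinny/skinny_assist.py | gen_ine_from_cnf
-- ===== SOURCE A (Python) =====
-- def gen_ine_from_cnf(cnf):
--     """
--     从cnf生成不等式，并存入best_ine文件,文字的命名：0,1，2，3...
--     """
--     vars=set()
--     all_clause=cnf[1:len(cnf)-1].split(')(')
--     vars={0,1,2,3,4,5,6,7,8,9,10,11,12,13,14,15}
--     ine_all=[]
--     for clause in all_clause:
--         liter=clause.split('+')
--         const=-1
--         tmp=[0 for i in range(len(vars)+2)]
--         for index in vars:
--             if str(index) in liter: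
--                 tmp[index]=1
--             if str(index)+"'" in liter:
--                 const+=1
--                 tmp[index]=-1
--         tmp[len(vars)]=const
--         ine_all.append(tmp)
--     return ine_all
-- ===== SOURCE B (Python) =====
-- STR2IDX = {str(k): k for k in range(16)}
--
-- def gen_ine_from_cnf(cnf):
--     """
--     从cnf生成不等式，并存入best_ine文件,文字的命名：0,1，2，3...
--     """
--     ine_all = []
--     for clause in cnf[1:len(cnf)-1].split(')('):
--         tokens = set(clause.split('+'))
--         tmp = [0] * 18
--         const = -1
--         for t in tokens:
--             if t in STR2IDX:
--                 tmp[STR2IDX[t]] = 1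
--         for t in tokens:
--             if t.endswith("'") and t[:-1] in STR2IDX:
--                 tmp[STR2IDX[t[:-1]]] = -1
--                 const += 1
--         tmp[16] = const
--         ine_all.append(tmp)
--     return ine_all
-- ===== Notes on version B (the rewrite author's own statement) =====
-- stated objective: alternative
-- what changed: Instead of scanning the fixed 16-variable universe with membership tests per variable, B iterates once over each clause's deduplicated literal tokens (a set) with a precomputed token-to-index dictionary, setting +1 coefficients for plain tokens and then -1 coefficients (and the constant) for primed tokens.
import Mathlib
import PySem

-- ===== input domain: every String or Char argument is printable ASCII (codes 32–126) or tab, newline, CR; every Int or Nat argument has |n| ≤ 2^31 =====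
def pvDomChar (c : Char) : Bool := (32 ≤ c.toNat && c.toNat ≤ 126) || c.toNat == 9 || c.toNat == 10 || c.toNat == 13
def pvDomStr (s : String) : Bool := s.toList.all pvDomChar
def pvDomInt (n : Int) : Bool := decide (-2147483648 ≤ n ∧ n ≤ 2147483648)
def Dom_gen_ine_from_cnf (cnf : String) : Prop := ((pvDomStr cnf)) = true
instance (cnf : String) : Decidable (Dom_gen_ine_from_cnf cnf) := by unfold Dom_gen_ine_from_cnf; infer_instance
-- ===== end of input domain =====

-- B iterates over each clause's (deduplicated) literal tokens with a token→variable dictionary,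
-- instead of A's scan of the fixed 16-variable universe with membership tests per variable (objective: alternative).

-- ===== PORT A =====
-- Python set {0,…,15} of small ints iterates in ascending order; ported as this list.
def pvVars : List Int := [0,1,2,3,4,5,6,7,8,9,10,11,12,13,14,15]

def pvStepA (liter : List String) (st : List Int × Int) (index : Int) : List Int × Int :=
  let tmp := if liter.contains (PySem.Int.toStr index) then PySem.List.pySetD st.1 index 1 else st.1
  if liter.contains (PySem.Int.toStr index ++ "'") then (PySem.List.pySetD tmp index (-1), st.2 + 1)
  else (tmp, st.2)

def pvClauseA (clause : String) : List Int :=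
  let liter := (PySem.Str.split? clause "+").getD []
  let st := pvVars.foldl (pvStepA liter) ((PySem.List.pyRange 0 (16 + 2) 1).map (fun _ => (0 : Int)), -1)
  PySem.List.pySetD st.1 16 st.2

def gen_ine_from_cnf (cnf : String) : List (List Int) :=
  let all_clause := (PySem.Str.split? (PySem.Str.slice cnf (some 1) (some (PySem.Str.len cnf - 1))) ")(").getD []
  all_clause.foldl (fun ine_all clause => ine_all ++ [pvClauseA clause]) []

-- ===== PORT B =====
def pvSTR2IDX : PySem.Dict String Int :=
  PySem.Dict.ofList ((PySem.List.pyRange 0 16 1).map (fun k => (PySem.Int.toStr k, k)))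

def pvStep1 (tmp : List Int) (t : String) : List Int :=
  match PySem.Dict.get? pvSTR2IDX t with
  | some k => PySem.List.pySetD tmp k 1
  | none => tmp

def pvStep2 (st : List Int × Int) (t : String) : List Int × Int :=
  if PySem.Str.endswith t "'" then
    match PySem.Dict.get? pvSTR2IDX (PySem.Str.slice t none (some (-1))) with
    | some k => (PySem.List.pySetD st.1 k (-1), st.2 + 1)
    | none => st
  else st

def pvClauseB (clause : String) : List Int :=
  let tokens := PySem.Set.ofList ((PySem.Str.split? clause "+").getD [])
  let tmp := tokens.foldl pvStep1 (List.replicate 18 (0 : Int))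
  let st := tokens.foldl pvStep2 (tmp, -1)
  PySem.List.pySetD st.1 16 st.2

def gen_ine_from_cnf_alt (cnf : String) : List (List Int) :=
  let all_clause := (PySem.Str.split? (PySem.Str.slice cnf (some 1) (some (PySem.Str.len cnf - 1))) ")(").getD []
  all_clause.foldl (fun ine_all clause => ine_all ++ [pvClauseB clause]) []

-- ===== PRECONDITION & SPEC =====
def Spec_gen_ine_from_cnf (cnf : String) (out : List (List Int)) : Prop := out = gen_ine_from_cnf_alt cnf
instance (cnf : String) (out : List (List Int)) : Decidable (Spec_gen_ine_from_cnf cnf out) := by unfold Spec_gen_ine_from_cnf; infer_instance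

-- ===== CLAIM (what is proved, stated in full; the proofs are below) =====
def Claim_equal_gen_ine_from_cnf : Prop := ∀ (cnf : String), Dom_gen_ine_from_cnf cnf → Spec_gen_ine_from_cnf cnf (gen_ine_from_cnf cnf)

-- ===== LEMMAS AND PROOFS =====

lemma pv_dict_lit : pvSTR2IDX = PySem.Dict.mk
    [("0",0),("1",1),("2",2),("3",3),("4",4),("5",5),("6",6),("7",7),("8",8),("9",9),
     ("10",10),("11",11),("12",12),("13",13),("14",14),("15",15)] := by decide

lemma pv_lookup_mem {s : String} {k : Int} (ps : List (String × Int))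
    (h : PySem.Dict.get? (PySem.Dict.mk ps) s = some k) : (s, k) ∈ ps := by
  induction ps with
  | nil => simp [PySem.Dict.get?] at h
  | cons p ps ih =>
    rw [show PySem.Dict.mk (p :: ps) = PySem.Dict.mk ((p.1, p.2) :: ps) from rfl,
        PySem.Dict.get?_mk_cons] at h
    by_cases hp : p.1 == s
    · simp [hp] at h
      simp [beq_iff_eq] at hp
      subst h; subst hp; simp
    · simp [hp] at h
      exact List.mem_cons_of_mem _ (ih h)

lemma pv_get?_STR2IDX (s : String) (k : Int) :
    PySem.Dict.get? pvSTR2IDX s = some k ↔ 0 ≤ k ∧ k < 16 ∧ s = PySem.Int.toStr k := by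
  constructor
  · intro h
    rw [pv_dict_lit] at h
    have hm := pv_lookup_mem _ h
    simp only [List.mem_cons, List.not_mem_nil, or_false, Prod.mk.injEq] at hm
    rcases hm with ⟨rfl, rfl⟩|⟨rfl, rfl⟩|⟨rfl, rfl⟩|⟨rfl, rfl⟩|⟨rfl, rfl⟩|⟨rfl, rfl⟩|⟨rfl, rfl⟩|⟨rfl, rfl⟩|⟨rfl, rfl⟩|⟨rfl, rfl⟩|⟨rfl, rfl⟩|⟨rfl, rfl⟩|⟨rfl, rfl⟩|⟨rfl, rfl⟩|⟨rfl, rfl⟩|⟨rfl, rfl⟩ <;>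
      exact ⟨by decide, by decide, by decide⟩
  · rintro ⟨h0, h1, rfl⟩
    interval_cases k <;> decide

lemma pv_mem_vars (k : Int) : k ∈ pvVars ↔ 0 ≤ k ∧ k < 16 := by
  simp [pvVars]; omega

lemma pv_foldA (liter : List String) (ks : List Int) (hks : ∀ k ∈ ks, 0 ≤ k)
    (tmp0 : List Int) (c0 : Int) :
    ((ks.foldl (pvStepA liter) (tmp0, c0)).1.length = tmp0.length) ∧
    (∀ i : Nat, i < tmp0.length →
      (ks.foldl (pvStepA liter) (tmp0, c0)).1[i]? =
        if (i : Int) ∈ ks then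
          (if liter.contains (PySem.Int.toStr (i : Int) ++ "'") then some (-1)
           else if liter.contains (PySem.Int.toStr (i : Int)) then some 1 else tmp0[i]?)
        else tmp0[i]?) ∧
    ((ks.foldl (pvStepA liter) (tmp0, c0)).2 =
      c0 + (ks.countP (fun k => liter.contains (PySem.Int.toStr k ++ "'")) : Int)) := by
  induction ks generalizing tmp0 c0 with
  | nil => simp
  | cons k ks ih =>
    have hk : 0 ≤ k := hks k (List.mem_cons_self ..)
    obtain ⟨ih1, ih2, ih3⟩ :=
      ih (fun x hx => hks x (List.mem_cons_of_mem _ hx))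
        (pvStepA liter (tmp0, c0) k).1 (pvStepA liter (tmp0, c0) k).2
    have hset : ∀ (xs : List Int) (v : Int), PySem.List.pySetD xs k v = xs.set k.toNat v :=
      fun xs v => PySem.List.pySetD_of_nonneg xs v hk
    have hlen1 : (pvStepA liter (tmp0, c0) k).1.length = tmp0.length := by
      simp only [pvStepA, hset]
      split_ifs <;> simp
    have hget : ∀ i : Nat, i < tmp0.length →
        (pvStepA liter (tmp0, c0) k).1[i]? =
          if (i : Int) = k then
            (if liter.contains (PySem.Int.toStr k ++ "'") then some (-1)
             else if liter.contains (PySem.Int.toStr k) then some 1 else tmp0[i]?)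
          else tmp0[i]? := by
      intro i hi
      simp only [pvStepA, hset]
      split_ifs <;> simp only [List.getElem?_set, List.length_set] <;> split_ifs <;>
        first | rfl | (exfalso; omega)
    have hc1 : (pvStepA liter (tmp0, c0) k).2 =
        if liter.contains (PySem.Int.toStr k ++ "'") then c0 + 1 else c0 := by
      simp only [pvStepA]
      split_ifs <;> rfl
    refine ⟨?_, ?_, ?_⟩
    · rw [List.foldl_cons, ih1, hlen1]
    · intro i hi
      rw [List.foldl_cons, ih2 i (by rw [hlen1]; exact hi)]
      by_cases hmem : (i : Int) ∈ ks
      · rw [if_pos hmem, if_pos (List.mem_cons_of_mem _ hmem)]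
        by_cases hpr : liter.contains (PySem.Int.toStr (i : Int) ++ "'") = true
        · rw [if_pos hpr, if_pos hpr]
        · rw [if_neg hpr, if_neg hpr]
          by_cases hpl : liter.contains (PySem.Int.toStr (i : Int)) = true
          · rw [if_pos hpl, if_pos hpl]
          · rw [if_neg hpl, if_neg hpl, hget i hi]
            by_cases hik : (i : Int) = k
            · rw [if_pos hik, ← hik, if_neg hpr, if_neg hpl]
            · rw [if_neg hik]
      · by_cases hik : (i : Int) = k
        · rw [if_neg hmem, if_pos (by rw [hik]; exact List.mem_cons_self ..), hget i hi,
              if_pos hik, ← hik]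
        · rw [if_neg hmem, if_neg (by simp [hik, hmem]), hget i hi, if_neg hik]
    · rw [List.foldl_cons, ih3, hc1, List.countP_cons]
      by_cases hpr : liter.contains (PySem.Int.toStr k ++ "'") = true
      · rw [if_pos hpr, if_pos hpr]; push_cast; ring
      · rw [if_neg hpr, if_neg hpr]; push_cast; ring

lemma pv_fold1 (ts : List String) (tmp0 : List Int) :
    ((ts.foldl pvStep1 tmp0).length = tmp0.length) ∧
    (∀ i : Nat, i < tmp0.length →
      (ts.foldl pvStep1 tmp0)[i]? =
        if i < 16 ∧ PySem.Int.toStr (i : Int) ∈ ts then some 1 else tmp0[i]?) := by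
  induction ts generalizing tmp0 with
  | nil => simp
  | cons t ts ih =>
    rcases hg : PySem.Dict.get? pvSTR2IDX t with _ | k
    · have hstep : pvStep1 tmp0 t = tmp0 := by simp [pvStep1, hg]
      rw [List.foldl_cons, hstep]
      obtain ⟨ih1, ih2⟩ := ih tmp0
      refine ⟨ih1, ?_⟩
      intro i hi
      rw [ih2 i hi]
      by_cases hc : i < 16 ∧ PySem.Int.toStr (i : Int) ∈ ts
      · rw [if_pos hc, if_pos ⟨hc.1, List.mem_cons_of_mem _ hc.2⟩]
      · rw [if_neg hc, if_neg ?_]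
        rintro ⟨h16, hmem⟩
        rcases List.mem_cons.mp hmem with heq | hmem'
        · have : PySem.Dict.get? pvSTR2IDX t = some (i : Int) := by
            rw [(pv_get?_STR2IDX t (i : Int)).mpr ⟨by omega, by omega, heq.symm⟩]
          rw [this] at hg; cases hg
        · exact hc ⟨h16, hmem'⟩
    · obtain ⟨hk0, hk16, ht⟩ := (pv_get?_STR2IDX t k).mp hg
      have hstep : pvStep1 tmp0 t = tmp0.set k.toNat 1 := by
        simp [pvStep1, hg, PySem.List.pySetD_of_nonneg _ _ hk0]
      rw [List.foldl_cons, hstep]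
      obtain ⟨ih1, ih2⟩ := ih (tmp0.set k.toNat 1)
      rw [List.length_set] at ih1 ih2
      refine ⟨ih1, ?_⟩
      intro i hi
      rw [ih2 i hi]
      by_cases hc : i < 16 ∧ PySem.Int.toStr (i : Int) ∈ ts
      · rw [if_pos hc, if_pos ⟨hc.1, List.mem_cons_of_mem _ hc.2⟩]
      · rw [if_neg hc]
        by_cases hik : i = k.toNat
        · rw [if_pos ⟨by omega, by rw [show (i : Int) = k by omega, ← ht]; exact List.mem_cons_self ..⟩]
          rw [List.getElem?_set, if_pos hik.symm, if_pos (by omega)]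
        · rw [List.getElem?_set, if_neg (fun h => hik h.symm), if_neg ?_]
          rintro ⟨h16, hmem⟩
          rcases List.mem_cons.mp hmem with heq | hmem'
          · rw [ht] at heq
            have : k = (i : Int) := by
              have h1 := (pv_get?_STR2IDX (PySem.Int.toStr k) k).mpr ⟨hk0, hk16, rfl⟩
              have h2 := (pv_get?_STR2IDX (PySem.Int.toStr (i:Int)) (i:Int)).mpr ⟨by omega, by omega, rfl⟩
              rw [heq] at h2; rw [h1] at h2; cases h2; rfl
            omega
          · exact hc ⟨h16, hmem'⟩

lemma pv_primed_shape (t : String) (k : Int) :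
    (PySem.Str.endswith t "'" = true ∧
     PySem.Dict.get? pvSTR2IDX (PySem.Str.slice t none (some (-1))) = some k)
    ↔ (0 ≤ k ∧ k < 16 ∧ t = PySem.Int.toStr k ++ "'") := by
  constructor
  · rintro ⟨he, hg⟩
    obtain ⟨hk0, hk16, hs⟩ := (pv_get?_STR2IDX _ k).mp hg
    refine ⟨hk0, hk16, ?_⟩
    rw [PySem.Str.endswith_eq] at he
    rw [PySem.Chars.endswith_iff] at he
    obtain ⟨l, hl⟩ := he
    apply String.toList_inj.mp
    have h1 : "'".toList = ['\''] := rfl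
    rw [h1] at hl
    have hdrop : t.toList.dropLast = (PySem.Int.toStr k).toList := by
      rw [← PySem.Str.slice_to_neg_one, hs]
    rw [← hl, List.dropLast_concat] at hdrop
    rw [← hl, hdrop]
    simp
  · rintro ⟨hk0, hk16, rfl⟩
    constructor
    · rw [PySem.Str.endswith_eq, PySem.Chars.endswith_iff]
      exact ⟨(PySem.Int.toStr k).toList, by simp⟩
    · have hsl : PySem.Str.slice (PySem.Int.toStr k ++ "'") none (some (-1)) = PySem.Int.toStr k := by
        apply String.toList_inj.mp
        rw [PySem.Str.slice_to_neg_one]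
        simp
      rw [hsl]
      exact (pv_get?_STR2IDX _ k).mpr ⟨hk0, hk16, rfl⟩

lemma pv_fold2 (ts : List String) (tmp0 : List Int) (c0 : Int) :
    ((ts.foldl pvStep2 (tmp0, c0)).1.length = tmp0.length) ∧
    (∀ i : Nat, i < tmp0.length →
      (ts.foldl pvStep2 (tmp0, c0)).1[i]? =
        if i < 16 ∧ (PySem.Int.toStr (i : Int) ++ "'") ∈ ts then some (-1) else tmp0[i]?) ∧
    ((ts.foldl pvStep2 (tmp0, c0)).2 =
      c0 + (ts.countP (fun t =>
        PySem.Str.endswith t "'" &&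
        (PySem.Dict.get? pvSTR2IDX (PySem.Str.slice t none (some (-1)))).isSome) : Int)) := by
  induction ts generalizing tmp0 c0 with
  | nil => simp
  | cons t ts ih =>
    by_cases hq : (PySem.Str.endswith t "'" &&
        (PySem.Dict.get? pvSTR2IDX (PySem.Str.slice t none (some (-1)))).isSome) = true
    · -- t is a valid primed token
      obtain ⟨he, hs⟩ := Bool.and_eq_true_iff.mp hq
      rcases hg : PySem.Dict.get? pvSTR2IDX (PySem.Str.slice t none (some (-1))) with _ | k
      · rw [hg] at hs; cases hs
      obtain ⟨hk0, hk16, ht⟩ := (pv_primed_shape t k).mp ⟨he, hg⟩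
      have hstep : pvStep2 (tmp0, c0) t = (tmp0.set k.toNat (-1), c0 + 1) := by
        simp only [pvStep2, he, if_true, hg, PySem.List.pySetD_of_nonneg _ _ hk0]
      rw [List.foldl_cons, hstep]
      obtain ⟨ih1, ih2, ih3⟩ := ih (tmp0.set k.toNat (-1)) (c0 + 1)
      rw [List.length_set] at ih1 ih2
      refine ⟨ih1, ?_, ?_⟩
      · intro i hi
        rw [ih2 i hi]
        by_cases hc : i < 16 ∧ (PySem.Int.toStr (i : Int) ++ "'") ∈ ts
        · rw [if_pos hc, if_pos ⟨hc.1, List.mem_cons_of_mem _ hc.2⟩]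
        · rw [if_neg hc]
          by_cases hik : i = k.toNat
          · rw [if_pos ⟨by omega, by rw [show (i : Int) = k by omega, ← ht]; exact List.mem_cons_self ..⟩]
            rw [List.getElem?_set, if_pos hik.symm, if_pos (by omega)]
          · rw [List.getElem?_set, if_neg (fun h => hik h.symm), if_neg ?_]
            rintro ⟨h16, hmem⟩
            rcases List.mem_cons.mp hmem with heq | hmem'
            · have h2 := (pv_primed_shape t (i : Int)).mpr ⟨by omega, by omega, heq.symm⟩
              rw [h2.2] at hg; cases hg; omega
            · exact hc ⟨h16, hmem'⟩
      · rw [ih3, List.countP_cons, if_pos hq]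
        push_cast; ring
    · -- t does not act
      have hstep : pvStep2 (tmp0, c0) t = (tmp0, c0) := by
        rcases he : PySem.Str.endswith t "'"
        · simp only [pvStep2, he]; simp
        · rcases hg : PySem.Dict.get? pvSTR2IDX (PySem.Str.slice t none (some (-1))) with _ | k
          · simp only [pvStep2, he, if_true, hg]
          · exfalso; apply hq; rw [he, hg]; rfl
      rw [List.foldl_cons, hstep]
      obtain ⟨ih1, ih2, ih3⟩ := ih tmp0 c0
      refine ⟨ih1, ?_, ?_⟩
      · intro i hi
        rw [ih2 i hi]
        by_cases hc : i < 16 ∧ (PySem.Int.toStr (i : Int) ++ "'") ∈ ts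
        · rw [if_pos hc, if_pos ⟨hc.1, List.mem_cons_of_mem _ hc.2⟩]
        · rw [if_neg hc, if_neg ?_]
          rintro ⟨h16, hmem⟩
          rcases List.mem_cons.mp hmem with heq | hmem'
          · have h2 := (pv_primed_shape t (i : Int)).mpr ⟨by omega, by omega, heq.symm⟩
            apply hq; rw [h2.1, h2.2]; rfl
          · exact hc ⟨h16, hmem'⟩
      · rw [ih3, List.countP_cons, if_neg hq]
        push_cast; ring

lemma pv_count (liter ts : List String) (hmem : ∀ t, t ∈ ts ↔ t ∈ liter) (hnd : ts.Nodup) :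
    ts.countP (fun t =>
      PySem.Str.endswith t "'" &&
      (PySem.Dict.get? pvSTR2IDX (PySem.Str.slice t none (some (-1)))).isSome) =
    pvVars.countP (fun k => liter.contains (PySem.Int.toStr k ++ "'")) := by
  have hq_iff : ∀ t : String, (PySem.Str.endswith t "'" &&
      (PySem.Dict.get? pvSTR2IDX (PySem.Str.slice t none (some (-1)))).isSome) = true ↔
      ∃ k : Int, 0 ≤ k ∧ k < 16 ∧ t = PySem.Int.toStr k ++ "'" := by
    intro t
    constructor
    · intro h
      obtain ⟨he, hs⟩ := Bool.and_eq_true_iff.mp h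
      rcases hgt : PySem.Dict.get? pvSTR2IDX (PySem.Str.slice t none (some (-1))) with _ | k
      · rw [hgt] at hs; cases hs
      · exact ⟨k, (pv_primed_shape t k).mp ⟨he, hgt⟩⟩
    · rintro ⟨k, hk0, hk16, rfl⟩
      have h2 := (pv_primed_shape _ k).mpr ⟨hk0, hk16, rfl⟩
      rw [h2.1, h2.2]; rfl
  have hginj : ∀ k1 k2 : Int, 0 ≤ k1 → k1 < 16 → 0 ≤ k2 → k2 < 16 →
      PySem.Int.toStr k1 ++ "'" = PySem.Int.toStr k2 ++ "'" → k1 = k2 := by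
    intro k1 k2 h1 h2 h3 h4 heq
    have h5 := (pv_primed_shape (PySem.Int.toStr k2 ++ "'") k1).mpr ⟨h1, h2, heq.symm⟩
    have h6 := (pv_primed_shape (PySem.Int.toStr k2 ++ "'") k2).mpr ⟨h3, h4, rfl⟩
    have h8 := h5.2.symm.trans h6.2
    cases h8; rfl
  have hperm : List.Perm (ts.filter (fun t =>
      PySem.Str.endswith t "'" &&
      (PySem.Dict.get? pvSTR2IDX (PySem.Str.slice t none (some (-1)))).isSome))
      ((pvVars.filter (fun k => liter.contains (PySem.Int.toStr k ++ "'"))).map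
        (fun k => PySem.Int.toStr k ++ "'")) := by
    have hnd2 : ((pvVars.filter (fun k => liter.contains (PySem.Int.toStr k ++ "'"))).map
        (fun k => PySem.Int.toStr k ++ "'")).Nodup := by
      refine List.Nodup.map_on ?_ ((by decide : pvVars.Nodup).filter _)
      intro k1 h1 k2 h2 heq
      obtain ⟨hk1, _⟩ := List.mem_filter.mp h1
      obtain ⟨hk2, _⟩ := List.mem_filter.mp h2
      obtain ⟨a1, b1⟩ := (pv_mem_vars k1).mp hk1
      obtain ⟨a2, b2⟩ := (pv_mem_vars k2).mp hk2
      exact hginj k1 k2 a1 b1 a2 b2 heq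
    rw [List.perm_ext_iff_of_nodup (hnd.filter _) hnd2]
    · intro t
      rw [List.mem_filter, List.mem_map]
      constructor
      · rintro ⟨htl, hqt⟩
        obtain ⟨k, hk0, hk16, rfl⟩ := (hq_iff t).mp hqt
        refine ⟨k, List.mem_filter.mpr ⟨(pv_mem_vars k).mpr ⟨hk0, hk16⟩, ?_⟩, rfl⟩
        rw [List.contains_iff_mem]
        exact (hmem _).mp htl
      · rintro ⟨k, hkf, rfl⟩
        obtain ⟨hkv, hcl⟩ := List.mem_filter.mp hkf
        obtain ⟨hk0, hk16⟩ := (pv_mem_vars k).mp hkv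
        refine ⟨(hmem _).mpr (List.contains_iff_mem.mp hcl), (hq_iff _).mpr ⟨k, hk0, hk16, rfl⟩⟩
  rw [List.countP_eq_length_filter, List.countP_eq_length_filter, hperm.length_eq,
    List.length_map]

lemma pv_clause (clause : String) : pvClauseA clause = pvClauseB clause := by
  unfold pvClauseA pvClauseB
  set liter := (PySem.Str.split? clause "+").getD [] with hliter
  set ts : List String := PySem.Set.ofList liter with hts
  have hmem : ∀ t, t ∈ ts ↔ t ∈ liter := fun t => PySem.Set.mem_ofList liter t
  have hnd : ts.Nodup := PySem.Set.nodup_ofList liter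
  have hzeros : ((PySem.List.pyRange 0 (16 + 2) 1).map (fun _ => (0 : Int))) =
      List.replicate 18 (0 : Int) := by decide
  rw [hzeros]
  obtain ⟨ha1, ha2, ha3⟩ := pv_foldA liter pvVars (by decide) (List.replicate 18 0) (-1)
  obtain ⟨hb1, hb2⟩ := pv_fold1 ts (List.replicate 18 0)
  obtain ⟨hc1, hc2, hc3⟩ := pv_fold2 ts (ts.foldl pvStep1 (List.replicate 18 0)) (-1)
  rw [List.length_replicate] at ha1 ha2 hb1 hb2
  rw [hb1] at hc1 hc2
  have hsetA : ∀ (xs : List Int) (v : Int), PySem.List.pySetD xs 16 v = xs.set 16 v :=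
    fun xs v => PySem.List.pySetD_of_nonneg xs v (by norm_num)
  rw [hsetA, hsetA]
  apply List.ext_getElem?
  intro i
  by_cases hi : i < 18
  · by_cases hi16 : i = 16
    · subst hi16
      have hlA : 16 < (List.foldl (pvStepA liter) (List.replicate 18 0, -1) pvVars).1.length := by
        rw [ha1]; omega
      have hlB : 16 < (List.foldl pvStep2 (List.foldl pvStep1 (List.replicate 18 0) ts, -1) ts).1.length := by
        rw [hc1]; omega
      rw [List.getElem?_set_self hlA, List.getElem?_set_self hlB, ha3, hc3,
        pv_count liter ts hmem hnd]
    · rw [List.getElem?_set_ne (fun h => hi16 h.symm), List.getElem?_set_ne (fun h => hi16 h.symm),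
        ha2 i hi, hc2 i hi, hb2 i hi]
      by_cases h16 : i < 16
      · rw [if_pos ((pv_mem_vars (i : Int)).mpr ⟨by omega, by omega⟩)]
        by_cases hpr : (PySem.Int.toStr (i : Int) ++ "'") ∈ liter
        · rw [if_pos (List.contains_iff_mem.mpr hpr),
            if_pos (show i < 16 ∧ PySem.Int.toStr (i : Int) ++ "'" ∈ ts from ⟨h16, (hmem _).mpr hpr⟩)]
        · rw [if_neg (show ¬liter.contains (PySem.Int.toStr (i : Int) ++ "'") = true from
              fun hh => hpr (List.contains_iff_mem.mp hh)),
            if_neg (show ¬(i < 16 ∧ PySem.Int.toStr (i : Int) ++ "'" ∈ ts) from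
              fun hh => hpr ((hmem _).mp hh.2))]
          by_cases hpl : PySem.Int.toStr (i : Int) ∈ liter
          · rw [if_pos (List.contains_iff_mem.mpr hpl),
              if_pos (show i < 16 ∧ PySem.Int.toStr (i : Int) ∈ ts from ⟨h16, (hmem _).mpr hpl⟩)]
          · rw [if_neg (show ¬liter.contains (PySem.Int.toStr (i : Int)) = true from
                fun hh => hpl (List.contains_iff_mem.mp hh)),
              if_neg (show ¬(i < 16 ∧ PySem.Int.toStr (i : Int) ∈ ts) from
                fun hh => hpl ((hmem _).mp hh.2))]
      · rw [if_neg (show ¬((i : Int) ∈ pvVars) from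
            fun hh => by have := (pv_mem_vars _).mp hh; omega),
          if_neg (show ¬(i < 16 ∧ PySem.Int.toStr (i : Int) ++ "'" ∈ ts) from fun hh => h16 hh.1),
          if_neg (show ¬(i < 16 ∧ PySem.Int.toStr (i : Int) ∈ ts) from fun hh => h16 hh.1)]
  · rw [List.getElem?_eq_none_iff.mpr, List.getElem?_eq_none_iff.mpr]
    · rw [List.length_set, hc1]; omega
    · rw [List.length_set, ha1]; omega

-- ===== VERDICT (by name: the statement is the Claim_ definition above) =====
theorem gen_ine_from_cnf_spec : Claim_equal_gen_ine_from_cnf := by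
  intro cnf _
  unfold Spec_gen_ine_from_cnf gen_ine_from_cnf gen_ine_from_cnf_alt
  simp [funext pv_clause]
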